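-- pv_equiv track=rewrite | github.com/postforty/Javascript-Python-Coding-Test-Study | programers_Lv0/주사위 게임 3.py | solution
-- ===== SOURCE A (Python) =====
-- def solution(a, b, c, d):
--     # 네 주사위에서 나온 숫자가 모두 p로 같다면 1111 × p점을 얻습니다.
--     if a == b == c == d:
--         return 1111 * a
--
--     temp_dict = {}
--     for n in [a, b, c, d]:
--         if n in temp_dict:
--             temp_dict[n] += 1
--         else:
--             temp_dict[n] = 1
--
--     temp_list = list(zip(temp_dict.keys(), temp_dict.values()))
--     temp_list.sort(key=lambda x: x[1], reverse=True)
--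
--     if len(temp_dict) == 2:
--         # 세 주사위에서 나온 숫자가 p로 같고 나머지 다른 주사위에서 나온 숫자가 q(p ≠ q)라면 (10 × p + q)2 점을 얻습니다.
--         if temp_list[0][1] == 3:
--             return (10 * temp_list[0][0] + temp_list[1][0]) ** 2
--
--         # 주사위가 두 개씩 같은 값이 나오고, 나온 숫자를 각각 p, q(p ≠ q)라고 한다면 (p + q) × |p - q|점을 얻습니다.
--         if temp_list[0][1] == 2:
--             return (temp_list[0][0] + temp_list[1][0]) * abs(temp_list[0][0] - temp_list[1][0])
--
--     # 어느 두 주사위에서 나온 숫자가 p로 같고 나머지 두 주사위에서 나온 숫자가 각각 p와 다른 q, r(q ≠ r)이라면 q × r점을 얻습니다.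
--     if len(temp_dict) == 3:
--         return (temp_list[1][0] * temp_list[2][0])
--
--     # 네 주사위에 적힌 숫자가 모두 다르다면 나온 숫자 중 가장 작은 숫자 만큼의 점수를 얻습니다.
--     return min(a, b, c, d)
-- ===== SOURCE B (Python) =====
-- def solution(a, b, c, d):
--     t = (a, b, c, d)
--     s = a + b + c + d
--     e = (a == b) + (a == c) + (a == d) + (b == c) + (b == d) + (c == d)
--     if e == 6:
--         return 1111 * a
--     if e == 3:
--         q = [x for x in t if t.count(x) == 1][0]
--         p = (s - q) // 3
--         return (10 * p + q) ** 2
--     if e == 2: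
--         return (s // 2) * (max(a, b, c, d) - min(a, b, c, d))
--     if e == 1:
--         q, r = [x for x in t if t.count(x) == 1]
--         return q * r
--     return min(a, b, c, d)
-- ===== Notes on version B (the rewrite author's own statement) =====
-- stated objective: simpler
-- what changed: Replaces the frequency dict plus count-sorted item list with a count of equal pairs among the six position pairs, recovering the triple/pair values arithmetically (sum minus single over 3, half-sum times max-min) instead of reading them off the sorted dict items.
import Mathlib
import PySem

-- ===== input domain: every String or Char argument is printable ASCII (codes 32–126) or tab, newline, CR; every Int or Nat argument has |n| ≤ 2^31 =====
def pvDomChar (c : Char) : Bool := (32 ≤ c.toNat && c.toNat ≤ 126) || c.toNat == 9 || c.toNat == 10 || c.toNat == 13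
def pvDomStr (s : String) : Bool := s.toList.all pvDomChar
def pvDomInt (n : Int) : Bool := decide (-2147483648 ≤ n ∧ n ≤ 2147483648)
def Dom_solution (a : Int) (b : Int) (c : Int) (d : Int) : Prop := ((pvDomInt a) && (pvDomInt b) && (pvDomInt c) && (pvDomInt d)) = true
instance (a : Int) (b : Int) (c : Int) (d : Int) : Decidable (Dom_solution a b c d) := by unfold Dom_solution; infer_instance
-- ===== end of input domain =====

-- B replaces A's frequency dict and count-sorted item list by counting equal position
-- pairs and recovering the triple/pair values arithmetically (simpler, same cost).

-- ===== PORT A =====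
def solution (a : Int) (b : Int) (c : Int) (d : Int) : Int :=
  if a = b ∧ b = c ∧ c = d then 1111 * a
  else
    -- the counting loop over [a, b, c, d]
    let tempDict : PySem.Dict Int Int :=
      [a, b, c, d].foldl
        (fun t n => if t.contains n then t.modify n 0 (· + 1) else t.insert n 1)
        PySem.Dict.empty
    -- list(zip(keys, values)) = items; .sort(key=λx. x[1], reverse=True)
    let tempList := PySem.List.sorted tempDict.items (fun p => p.2) true
    if tempDict.size = 2 ∧ (PySem.List.pyGetD tempList 0 (0, 0)).2 = 3 then
      (10 * (PySem.List.pyGetD tempList 0 (0, 0)).1 + (PySem.List.pyGetD tempList 1 (0, 0)).1) ^ 2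
    else if tempDict.size = 2 ∧ (PySem.List.pyGetD tempList 0 (0, 0)).2 = 2 then
      ((PySem.List.pyGetD tempList 0 (0, 0)).1 + (PySem.List.pyGetD tempList 1 (0, 0)).1) *
        |(PySem.List.pyGetD tempList 0 (0, 0)).1 - (PySem.List.pyGetD tempList 1 (0, 0)).1|
    else if tempDict.size = 3 then
      (PySem.List.pyGetD tempList 1 (0, 0)).1 * (PySem.List.pyGetD tempList 2 (0, 0)).1
    else
      min a (min b (min c d))

-- ===== PORT B =====
def solution_alt (a : Int) (b : Int) (c : Int) (d : Int) : Int :=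
  let t : List Int := [a, b, c, d]
  let s := a + b + c + d
  let e : Int := (if a = b then 1 else 0) + (if a = c then 1 else 0) + (if a = d then 1 else 0)
               + (if b = c then 1 else 0) + (if b = d then 1 else 0) + (if c = d then 1 else 0)
  if e = 6 then 1111 * a
  else if e = 3 then
    -- [x for x in t if t.count(x) == 1][0]  (the branch guarantees the list is nonempty)
    let q := (t.filter (fun x => PySem.List.count t x = 1)).headD 0
    let p := PySem.Int.floordiv (s - q) 3
    (10 * p + q) ^ 2
  else if e = 2 then
    PySem.Int.floordiv s 2 * (max a (max b (max c d)) - min a (min b (min c d)))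
  else if e = 1 then
    let ones := t.filter (fun x => PySem.List.count t x = 1)
    ones.headD 0 * ones.tail.headD 0
  else
    min a (min b (min c d))

-- ===== PRECONDITION & SPEC =====
def Spec_solution (a : Int) (b : Int) (c : Int) (d : Int) (out : Int) : Prop := out = solution_alt a b c d
instance (a : Int) (b : Int) (c : Int) (d : Int) (out : Int) : Decidable (Spec_solution a b c d out) := by unfold Spec_solution; infer_instance

-- ===== CLAIM (what is proved, stated in full; the proofs are below) =====
def Claim_equal_solution : Prop := ∀ (a : Int) (b : Int) (c : Int) (d : Int), Dom_solution a b c d → Spec_solution a b c d (solution a b c d)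

-- ===== LEMMAS AND PROOFS =====
-- One lemma per equality pattern of the four arguments (15 set partitions of the positions).
lemma pv_aaaa (a : Int)  : solution a a a a = solution_alt a a a a := by
  unfold solution solution_alt
  simp [List.foldl, PySem.Dict.contains, PySem.Dict.insert, PySem.Dict.modify, PySem.Dict.getD,
    PySem.Dict.get?, PySem.Dict.empty, PySem.Dict.size, PySem.List.count,
    PySem.List.pyGetD, PySem.List.pyGet?, PySem.List.pyIdx?, List.filter,
    PySem.Int.floordiv_eq_ediv_of_pos, max_sub_min_eq_abs,
      PySem.List.sorted, PySem.List.insertBy] <;>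
  first | rfl | (congr 1 <;> first | omega | rw [abs_sub_comm]) | omega

lemma pv_saaa (a c : Int) (h0 : a≠c) : solution c a a a = solution_alt c a a a := by
  unfold solution solution_alt
  simp [List.foldl, PySem.Dict.contains, PySem.Dict.insert, PySem.Dict.modify, PySem.Dict.getD,
    PySem.Dict.get?, PySem.Dict.empty, PySem.Dict.size, PySem.List.count,
    PySem.List.pyGetD, PySem.List.pyGet?, PySem.List.pyIdx?, List.filter,
    PySem.Int.floordiv_eq_ediv_of_pos, max_sub_min_eq_abs,
    h0, Ne.symm h0, PySem.List.sorted, PySem.List.insertBy] <;>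
  first | rfl | (congr 1 <;> first | omega | rw [abs_sub_comm]) | omega

lemma pv_asaa (a c : Int) (h0 : a≠c) : solution a c a a = solution_alt a c a a := by
  unfold solution solution_alt
  simp [List.foldl, PySem.Dict.contains, PySem.Dict.insert, PySem.Dict.modify, PySem.Dict.getD,
    PySem.Dict.get?, PySem.Dict.empty, PySem.Dict.size, PySem.List.count,
    PySem.List.pyGetD, PySem.List.pyGet?, PySem.List.pyIdx?, List.filter,
    PySem.Int.floordiv_eq_ediv_of_pos, max_sub_min_eq_abs,
    h0, Ne.symm h0, PySem.List.sorted, PySem.List.insertBy] <;>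
  first | rfl | (congr 1 <;> first | omega | rw [abs_sub_comm]) | omega

lemma pv_aasa (a c : Int) (h0 : a≠c) : solution a a c a = solution_alt a a c a := by
  unfold solution solution_alt
  simp [List.foldl, PySem.Dict.contains, PySem.Dict.insert, PySem.Dict.modify, PySem.Dict.getD,
    PySem.Dict.get?, PySem.Dict.empty, PySem.Dict.size, PySem.List.count,
    PySem.List.pyGetD, PySem.List.pyGet?, PySem.List.pyIdx?, List.filter,
    PySem.Int.floordiv_eq_ediv_of_pos, max_sub_min_eq_abs,
    h0, Ne.symm h0, PySem.List.sorted, PySem.List.insertBy] <;>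
  first | rfl | (congr 1 <;> first | omega | rw [abs_sub_comm]) | omega

lemma pv_aaas (a c : Int) (h0 : a≠c) : solution a a a c = solution_alt a a a c := by
  unfold solution solution_alt
  simp [List.foldl, PySem.Dict.contains, PySem.Dict.insert, PySem.Dict.modify, PySem.Dict.getD,
    PySem.Dict.get?, PySem.Dict.empty, PySem.Dict.size, PySem.List.count,
    PySem.List.pyGetD, PySem.List.pyGet?, PySem.List.pyIdx?, List.filter,
    PySem.Int.floordiv_eq_ediv_of_pos, max_sub_min_eq_abs,
    h0, Ne.symm h0, PySem.List.sorted, PySem.List.insertBy] <;>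
  first | rfl | (congr 1 <;> first | omega | rw [abs_sub_comm]) | omega

lemma pv_aabb (a c : Int) (h0 : a≠c) : solution a a c c = solution_alt a a c c := by
  unfold solution solution_alt
  simp [List.foldl, PySem.Dict.contains, PySem.Dict.insert, PySem.Dict.modify, PySem.Dict.getD,
    PySem.Dict.get?, PySem.Dict.empty, PySem.Dict.size, PySem.List.count,
    PySem.List.pyGetD, PySem.List.pyGet?, PySem.List.pyIdx?, List.filter,
    PySem.Int.floordiv_eq_ediv_of_pos, max_sub_min_eq_abs,
    h0, Ne.symm h0, PySem.List.sorted, PySem.List.insertBy] <;>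
  first | rfl | (congr 1 <;> first | omega | rw [abs_sub_comm]) | omega

lemma pv_abab (a c : Int) (h0 : a≠c) : solution a c a c = solution_alt a c a c := by
  unfold solution solution_alt
  simp [List.foldl, PySem.Dict.contains, PySem.Dict.insert, PySem.Dict.modify, PySem.Dict.getD,
    PySem.Dict.get?, PySem.Dict.empty, PySem.Dict.size, PySem.List.count,
    PySem.List.pyGetD, PySem.List.pyGet?, PySem.List.pyIdx?, List.filter,
    PySem.Int.floordiv_eq_ediv_of_pos, max_sub_min_eq_abs,
    h0, Ne.symm h0, PySem.List.sorted, PySem.List.insertBy] <;>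
  first | rfl | (congr 1 <;> first | omega | rw [abs_sub_comm]) | omega

lemma pv_abba (a c : Int) (h0 : a≠c) : solution a c c a = solution_alt a c c a := by
  unfold solution solution_alt
  simp [List.foldl, PySem.Dict.contains, PySem.Dict.insert, PySem.Dict.modify, PySem.Dict.getD,
    PySem.Dict.get?, PySem.Dict.empty, PySem.Dict.size, PySem.List.count,
    PySem.List.pyGetD, PySem.List.pyGet?, PySem.List.pyIdx?, List.filter,
    PySem.Int.floordiv_eq_ediv_of_pos, max_sub_min_eq_abs,
    h0, Ne.symm h0, PySem.List.sorted, PySem.List.insertBy] <;>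
  first | rfl | (congr 1 <;> first | omega | rw [abs_sub_comm]) | omega

lemma pv_aacd (a c d : Int) (h0 : a≠c) (h1 : a≠d) (h2 : c≠d) : solution a a c d = solution_alt a a c d := by
  unfold solution solution_alt
  simp [List.foldl, PySem.Dict.contains, PySem.Dict.insert, PySem.Dict.modify, PySem.Dict.getD,
    PySem.Dict.get?, PySem.Dict.empty, PySem.Dict.size, PySem.List.count,
    PySem.List.pyGetD, PySem.List.pyGet?, PySem.List.pyIdx?, List.filter,
    PySem.Int.floordiv_eq_ediv_of_pos, max_sub_min_eq_abs,
    h0, h1, h2, Ne.symm h0, Ne.symm h1, Ne.symm h2, PySem.List.sorted, PySem.List.insertBy] <;>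
  first | rfl | (congr 1 <;> first | omega | rw [abs_sub_comm]) | omega

lemma pv_acad (a c d : Int) (h0 : a≠c) (h1 : a≠d) (h2 : c≠d) : solution a c a d = solution_alt a c a d := by
  unfold solution solution_alt
  simp [List.foldl, PySem.Dict.contains, PySem.Dict.insert, PySem.Dict.modify, PySem.Dict.getD,
    PySem.Dict.get?, PySem.Dict.empty, PySem.Dict.size, PySem.List.count,
    PySem.List.pyGetD, PySem.List.pyGet?, PySem.List.pyIdx?, List.filter,
    PySem.Int.floordiv_eq_ediv_of_pos, max_sub_min_eq_abs,
    h0, h1, h2, Ne.symm h0, Ne.symm h1, Ne.symm h2, PySem.List.sorted, PySem.List.insertBy] <;>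
  first | rfl | (congr 1 <;> first | omega | rw [abs_sub_comm]) | omega

lemma pv_acda (a c d : Int) (h0 : a≠c) (h1 : a≠d) (h2 : c≠d) : solution a c d a = solution_alt a c d a := by
  unfold solution solution_alt
  simp [List.foldl, PySem.Dict.contains, PySem.Dict.insert, PySem.Dict.modify, PySem.Dict.getD,
    PySem.Dict.get?, PySem.Dict.empty, PySem.Dict.size, PySem.List.count,
    PySem.List.pyGetD, PySem.List.pyGet?, PySem.List.pyIdx?, List.filter,
    PySem.Int.floordiv_eq_ediv_of_pos, max_sub_min_eq_abs,
    h0, h1, h2, Ne.symm h0, Ne.symm h1, Ne.symm h2, PySem.List.sorted, PySem.List.insertBy] <;>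
  first | rfl | (congr 1 <;> first | omega | rw [abs_sub_comm]) | omega

lemma pv_caad (a c d : Int) (h0 : a≠c) (h1 : a≠d) (h2 : c≠d) : solution c a a d = solution_alt c a a d := by
  unfold solution solution_alt
  simp [List.foldl, PySem.Dict.contains, PySem.Dict.insert, PySem.Dict.modify, PySem.Dict.getD,
    PySem.Dict.get?, PySem.Dict.empty, PySem.Dict.size, PySem.List.count,
    PySem.List.pyGetD, PySem.List.pyGet?, PySem.List.pyIdx?, List.filter,
    PySem.Int.floordiv_eq_ediv_of_pos, max_sub_min_eq_abs,
    h0, h1, h2, Ne.symm h0, Ne.symm h1, Ne.symm h2, PySem.List.sorted, PySem.List.insertBy] <;>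
  first | rfl | (congr 1 <;> first | omega | rw [abs_sub_comm]) | omega

lemma pv_cada (a c d : Int) (h0 : a≠c) (h1 : a≠d) (h2 : c≠d) : solution c a d a = solution_alt c a d a := by
  unfold solution solution_alt
  simp [List.foldl, PySem.Dict.contains, PySem.Dict.insert, PySem.Dict.modify, PySem.Dict.getD,
    PySem.Dict.get?, PySem.Dict.empty, PySem.Dict.size, PySem.List.count,
    PySem.List.pyGetD, PySem.List.pyGet?, PySem.List.pyIdx?, List.filter,
    PySem.Int.floordiv_eq_ediv_of_pos, max_sub_min_eq_abs,
    h0, h1, h2, Ne.symm h0, Ne.symm h1, Ne.symm h2, PySem.List.sorted, PySem.List.insertBy] <;>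
  first | rfl | (congr 1 <;> first | omega | rw [abs_sub_comm]) | omega

lemma pv_cdaa (a c d : Int) (h0 : a≠c) (h1 : a≠d) (h2 : c≠d) : solution c d a a = solution_alt c d a a := by
  unfold solution solution_alt
  simp [List.foldl, PySem.Dict.contains, PySem.Dict.insert, PySem.Dict.modify, PySem.Dict.getD,
    PySem.Dict.get?, PySem.Dict.empty, PySem.Dict.size, PySem.List.count,
    PySem.List.pyGetD, PySem.List.pyGet?, PySem.List.pyIdx?, List.filter,
    PySem.Int.floordiv_eq_ediv_of_pos, max_sub_min_eq_abs,
    h0, h1, h2, Ne.symm h0, Ne.symm h1, Ne.symm h2, PySem.List.sorted, PySem.List.insertBy] <;>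
  first | rfl | (congr 1 <;> first | omega | rw [abs_sub_comm]) | omega

lemma pv_abcd (a b c d : Int) (h0 : a≠b) (h1 : a≠c) (h2 : a≠d) (h3 : b≠c) (h4 : b≠d) (h5 : c≠d) : solution a b c d = solution_alt a b c d := by
  unfold solution solution_alt
  simp [List.foldl, PySem.Dict.contains, PySem.Dict.insert, PySem.Dict.modify, PySem.Dict.getD,
    PySem.Dict.get?, PySem.Dict.empty, PySem.Dict.size, PySem.List.count,
    PySem.List.pyGetD, PySem.List.pyGet?, PySem.List.pyIdx?, List.filter,
    PySem.Int.floordiv_eq_ediv_of_pos, max_sub_min_eq_abs,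
    h0, h1, h2, h3, h4, h5, Ne.symm h0, Ne.symm h1, Ne.symm h2, Ne.symm h3, Ne.symm h4, Ne.symm h5, PySem.List.sorted, PySem.List.insertBy] <;>
  first | rfl | (congr 1 <;> first | omega | rw [abs_sub_comm]) | omega

-- ===== VERDICT (by name: the statement is the Claim_ definition above) =====
theorem solution_spec : Claim_equal_solution := by
  intro a b c d _
  unfold Spec_solution
  by_cases hab : a = b <;> by_cases hac : a = c <;> by_cases had : a = d <;>
    by_cases hbc : b = c <;> by_cases hbd : b = d <;> by_cases hcd : c = d <;>
    subst_eqs <;>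
    first
      | exact pv_aaaa _
      | exact pv_saaa _ _ (by omega)
      | exact pv_asaa _ _ (by omega)
      | exact pv_aasa _ _ (by omega)
      | exact pv_aaas _ _ (by omega)
      | exact pv_aabb _ _ (by omega)
      | exact pv_abab _ _ (by omega)
      | exact pv_abba _ _ (by omega)
      | exact pv_aacd _ _ _ (by omega) (by omega) (by omega)
      | exact pv_acad _ _ _ (by omega) (by omega) (by omega)
      | exact pv_acda _ _ _ (by omega) (by omega) (by omega)
      | exact pv_caad _ _ _ (by omega) (by omega) (by omega)
      | exact pv_cada _ _ _ (by omega) (by omega) (by omega)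
      | exact pv_cdaa _ _ _ (by omega) (by omega) (by omega)
      | exact pv_abcd _ _ _ _ (by omega) (by omega) (by omega) (by omega) (by omega) (by omega)
      | (exfalso; omega)
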